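-- pv_equiv track=rewrite | github.com/Avinashkushawaha/dsa-python | main.py | calculate_good_name_distance
-- ===== SOURCE A (Python) =====
-- def calculate_good_name_distance(name, good_string):
--     total_distance = 0
--     last_good_letter = good_string[0]  # Initially, the first letter of good string
--
--     for char in name:
--         if char in good_string:
--             # No change needed if the character is already a good letter
--             last_good_letter = char  # Update the last good letter used
--             continue
--
--         # If the character is not in the good string, find the nearest good letter
--         nearest_good_letter = None
--         min_distance = float('inf')
--
--         for good_char in good_string:
--             # Calculate distance from char to good_char
--             distance = abs(ord(char) - ord(good_char))
--             if distance < min_distance: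
--                 min_distance = distance
--                 nearest_good_letter = good_char
--             elif distance == min_distance:
--                 # If distances are equal, choose based on previous good letter
--                 prev_distance = abs(ord(last_good_letter) - ord(good_char))
--                 if nearest_good_letter is not None:
--                     current_prev_distance = abs(ord(last_good_letter) - ord(nearest_good_letter))
--                     if prev_distance < current_prev_distance:
--                         nearest_good_letter = good_char
--
--         # Update total distance and last good letter used
--         total_distance += min_distance
--         last_good_letter = nearest_good_letter
--
--     return total_distance
-- ===== SOURCE B (Python) =====
-- def calculate_good_name_distance(name, good_string):
--     # Precompute, for every ASCII code 0..127, the distance to the nearest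
--     # good-character code with two linear sweeps, then sum table lookups.
--     good = set(good_string.encode('latin-1'))
--     BIG = 1 << 30
--     fwd = []
--     last = None
--     for c in range(128):
--         if c in good:
--             last = c
--         fwd.append(c - last if last is not None else BIG)
--     rev = []
--     last = None
--     for c in range(127, -1, -1):
--         if c in good:
--             last = c
--         back = last - c if last is not None else BIG
--         rev.append(min(fwd[c], back))
--     dist = rev[::-1]
--     return sum(dist[b] for b in name.encode('latin-1'))
-- ===== Notes on version B (the rewrite author's own statement) =====
-- stated objective: alternative
-- what changed: B precomputes a 128-entry nearest-good-code distance table with two linear sweeps over the ASCII range and sums one table lookup per name character, instead of A's inner scan of good_string for every non-good character; Pre_ excludes only good_string == '', on which A raises IndexError at good_string[0].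
import Mathlib
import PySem

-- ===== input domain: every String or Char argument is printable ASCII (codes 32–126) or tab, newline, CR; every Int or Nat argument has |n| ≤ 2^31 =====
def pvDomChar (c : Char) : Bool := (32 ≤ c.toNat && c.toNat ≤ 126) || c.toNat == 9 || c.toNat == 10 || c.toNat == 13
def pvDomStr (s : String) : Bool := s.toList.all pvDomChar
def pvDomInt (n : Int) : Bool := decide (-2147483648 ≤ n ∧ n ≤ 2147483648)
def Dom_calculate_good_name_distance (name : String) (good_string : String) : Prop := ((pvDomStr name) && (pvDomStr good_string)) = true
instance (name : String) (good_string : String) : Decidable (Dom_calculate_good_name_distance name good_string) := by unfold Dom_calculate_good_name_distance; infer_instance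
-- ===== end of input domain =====

-- B replaces A's per-character inner scan over good_string by a 128-entry
-- nearest-good-code distance table built with two linear sweeps, then sums table lookups.

-- ===== PORT A =====
-- inner 'for good_char in good_string' loop; state = (nearest_good_letter, min_distance),
-- None/inf modelled as Option.none
def pvInnerA (ch last : Char) (gs : List Char) : Option Char × Option Int :=
  gs.foldl (fun st g =>
    let d : Int := |(ch.toNat : Int) - (g.toNat : Int)|
    match st.2 with
    | none => (some g, some d)
    | some m =>
      if d < m then (some g, some d)
      else if d = m then
        match st.1 with
        | some ng =>
          if |(last.toNat : Int) - (g.toNat : Int)| < |(last.toNat : Int) - (ng.toNat : Int)|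
          then (some g, st.2) else st
        | none => st
      else st) (none, none)

def calculate_good_name_distance (name : String) (good_string : String) : Int :=
  match PySem.Str.pyGet? good_string 0 with
  | none => 0  -- Python raises IndexError here; excluded by Pre_
  | some c0 =>
    (name.toList.foldl (fun (st : Int × Char) ch =>
      if ch ∈ good_string.toList then (st.1, ch)
      else
        let r := pvInnerA ch st.2 good_string.toList
        -- with good_string nonempty r.2/r.1 are always some; getD totalizes
        (st.1 + r.2.getD 0, r.1.getD st.2)) (0, c0)).1

-- ===== PORT B =====
-- set(good_string.encode('latin-1')) / name.encode('latin-1') are ported as the list of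
-- char codes (exact for the code points ≤ 255 the ASCII domain admits); dist[b] is pyGetD.
def calculate_good_name_distance_alt (name : String) (good_string : String) : Int :=
  let good : PySem.Set Int := PySem.Set.ofList (good_string.toList.map (fun g => (g.toNat : Int)))
  let BIG : Int := 1 <<< 30
  let fwdSt := (PySem.List.pyRange 0 128 1).foldl
    (fun (st : List Int × Option Int) c =>
      let last := if c ∈ good then some c else st.2
      (st.1 ++ [match last with | some l => c - l | none => BIG], last))
    ([], none)
  let fwd := fwdSt.1
  let revSt := (PySem.List.pyRange 127 (-1) (-1)).foldl
    (fun (st : List Int × Option Int) c =>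
      let last := if c ∈ good then some c else st.2
      let back := match last with | some l => l - c | none => BIG
      (st.1 ++ [min (PySem.List.pyGetD fwd c 0) back], last))
    ([], none)
  let dist := revSt.1.reverse  -- rev[::-1]: full negative-step slice = reverse (exact)
  name.toList.foldl (fun acc ch => acc + PySem.List.pyGetD dist ((ch.toNat : Int)) 0) 0

-- ===== PRECONDITION & SPEC =====
-- Pre_ excludes only good_string = "" , on which A raises IndexError at good_string[0].
def Pre_calculate_good_name_distance (_name : String) (good_string : String) : Prop :=
  good_string ≠ ""
instance (name : String) (good_string : String) : Decidable (Pre_calculate_good_name_distance name good_string) := by unfold Pre_calculate_good_name_distance; infer_instance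

def pvWitness_calculate_good_name_distance : String × String := ("hello", "abc")

def Spec_calculate_good_name_distance (name : String) (good_string : String) (out : Int) : Prop := out = calculate_good_name_distance_alt name good_string
instance (name : String) (good_string : String) (out : Int) : Decidable (Spec_calculate_good_name_distance name good_string out) := by unfold Spec_calculate_good_name_distance; infer_instance

-- ===== CLAIM (what is proved, stated in full; the proofs are below) =====
def Claim_equal_calculate_good_name_distance : Prop := ∀ (name : String) (good_string : String), Dom_calculate_good_name_distance name good_string → Pre_calculate_good_name_distance name good_string → Spec_calculate_good_name_distance name good_string (calculate_good_name_distance name good_string)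

-- ===== LEMMAS AND PROOFS =====

-- running 'last seen good code' state of a sweep visiting codes φ 0, φ 1, …
def pvScanState (G : List Int) (φ : Nat → Int) : Nat → Option Int
  | 0 => none
  | n+1 => if φ n ∈ G then some (φ n) else pvScanState G φ n

-- a sweep fold = map of per-index outputs + final state
theorem pvScan_fold (G : List Int) (out : Option Int → Int → Int) (φ : Nat → Int) (n : Nat) :
    (((List.range n).map φ).foldl (fun (st : List Int × Option Int) c =>
      (st.1 ++ [out (if c ∈ G then some c else st.2) c], if c ∈ G then some c else st.2)) ([], none))
    = ((List.range n).map (fun k => out (pvScanState G φ (k+1)) (φ k)), pvScanState G φ n) := by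
  induction n with
  | zero => simp [pvScanState]
  | succ n ih =>
    rw [List.range_succ, List.map_append, List.foldl_append, ih]
    simp [pvScanState]

-- characterization of the increasing sweep state: greatest good code < n
theorem pvScan_up_char (G : List Int) (n : Nat) :
    (∀ l, pvScanState G (fun k => (k : Int)) n = some l →
      l ∈ G ∧ 0 ≤ l ∧ l < n ∧ ∀ g ∈ G, 0 ≤ g → g < n → g ≤ l) ∧
    (pvScanState G (fun k => (k : Int)) n = none → ∀ g ∈ G, ¬(0 ≤ g ∧ g < (n : Int))) := by
  induction n with
  | zero =>
    refine ⟨fun l h => by simp [pvScanState] at h, fun _ g _ => by omega⟩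
  | succ n ih =>
    by_cases hmem : ((n : Int)) ∈ G
    · refine ⟨fun l h => ?_, fun h => ?_⟩
      · simp only [pvScanState, if_pos hmem, Option.some.injEq] at h
        subst h
        refine ⟨hmem, by omega, by push_cast; omega, fun g _ _ hlt => by push_cast at hlt; omega⟩
      · simp [pvScanState, if_pos hmem] at h
    · refine ⟨fun l h => ?_, fun h => ?_⟩
      · simp only [pvScanState, if_neg hmem] at h
        obtain ⟨h1, h2, h3, h4⟩ := ih.1 l h
        refine ⟨h1, h2, by push_cast at h3 ⊢; omega, ?_⟩
        intro g hg hg0 hlt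
        have hne : g ≠ (n : Int) := fun he => hmem (he ▸ hg)
        exact h4 g hg hg0 (by push_cast at hlt ⊢; omega)
      · simp only [pvScanState, if_neg hmem] at h
        intro g hg hcon
        have hne : g ≠ (n : Int) := fun he => hmem (he ▸ hg)
        exact ih.2 h g hg ⟨hcon.1, by push_cast at hcon ⊢; omega⟩

-- characterization of the decreasing sweep state: least good code ≥ 128 - j (≤ 127)
theorem pvScan_down_char (G : List Int) (j : Nat) :
    (∀ l, pvScanState G (fun k => 127 - (k : Int)) j = some l →
      l ∈ G ∧ 128 - (j : Int) ≤ l ∧ l ≤ 127 ∧ ∀ g ∈ G, 128 - (j : Int) ≤ g → g ≤ 127 → l ≤ g) ∧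
    (pvScanState G (fun k => 127 - (k : Int)) j = none →
      ∀ g ∈ G, ¬(128 - (j : Int) ≤ g ∧ g ≤ 127)) := by
  induction j with
  | zero =>
    refine ⟨fun l h => by simp [pvScanState] at h, fun _ g _ => by omega⟩
  | succ j ih =>
    by_cases hmem : ((127 - (j : Int))) ∈ G
    · refine ⟨fun l h => ?_, fun h => ?_⟩
      · simp only [pvScanState, if_pos hmem, Option.some.injEq] at h
        subst h
        refine ⟨hmem, by push_cast; omega, by omega, ?_⟩
        intro g hg hge _; push_cast at hge ⊢; omega
      · simp [pvScanState, if_pos hmem] at h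
    · refine ⟨fun l h => ?_, fun h => ?_⟩
      · simp only [pvScanState, if_neg hmem] at h
        obtain ⟨h1, h2, h3, h4⟩ := ih.1 l h
        refine ⟨h1, by push_cast at h2 ⊢; omega, h3, ?_⟩
        intro g hg hge hle
        have hne : g ≠ 127 - (j : Int) := fun he => hmem (he ▸ hg)
        exact h4 g hg (by push_cast at hge ⊢; omega) hle
      · simp only [pvScanState, if_neg hmem] at h
        intro g hg hcon
        have hne : g ≠ 127 - (j : Int) := fun he => hmem (he ▸ hg)
        exact ih.2 h g hg ⟨by push_cast at hcon ⊢; omega, hcon.2⟩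

-- the minimum A's inner loop computes, as a plain fold of min
def pvMinFold (c : Int) (G : List Int) (a : Int) : Int :=
  G.foldl (fun m g => min m |c - g|) a

theorem pvMinFold_le_init (c : Int) (G : List Int) : ∀ (a : Int), pvMinFold c G a ≤ a := by
  induction G with
  | nil => intro a; simp [pvMinFold]
  | cons g G ih =>
    intro a
    calc pvMinFold c (g :: G) a = pvMinFold c G (min a |c - g|) := rfl
    _ ≤ min a |c - g| := ih _
    _ ≤ a := min_le_left _ _

theorem pvMinFold_le_mem (c : Int) (G : List Int) : ∀ (a : Int) {g : Int}, g ∈ G →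
    pvMinFold c G a ≤ |c - g| := by
  induction G with
  | nil => intro a g hg; simp at hg
  | cons x G ih =>
    intro a g hg
    rcases List.mem_cons.1 hg with h | h
    · subst h
      calc pvMinFold c (g :: G) a = pvMinFold c G (min a |c - g|) := rfl
      _ ≤ min a |c - g| := pvMinFold_le_init _ _ _
      _ ≤ |c - g| := min_le_right _ _
    · exact ih _ h

theorem pvMinFold_attained (c : Int) (G : List Int) : ∀ (a : Int),
    pvMinFold c G a = a ∨ ∃ g ∈ G, pvMinFold c G a = |c - g| := by
  induction G with
  | nil => intro a; left; simp [pvMinFold]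
  | cons x G ih =>
    intro a
    rcases ih (min a |c - x|) with h | ⟨g, hg, h⟩
    · have : pvMinFold c (x :: G) a = min a |c - x| := h
      rcases min_cases a |c - x| with ⟨he, _⟩ | ⟨he, _⟩
      · left; rw [this, he]
      · right; exact ⟨x, List.mem_cons_self, by rw [this, he]⟩
    · right; exact ⟨g, List.mem_cons_of_mem _ hg, h⟩

-- A's inner-loop min_distance is that fold of min (nearest does not influence it)
theorem pvInnerA_snd (ch last : Char) : ∀ (gs : List Char) (st : Option Char × Option Int),
    (gs.foldl (fun st g =>
      let d : Int := |(ch.toNat : Int) - (g.toNat : Int)|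
      match st.2 with
      | none => (some g, some d)
      | some m =>
        if d < m then (some g, some d)
        else if d = m then
          match st.1 with
          | some ng =>
            if |(last.toNat : Int) - (g.toNat : Int)| < |(last.toNat : Int) - (ng.toNat : Int)|
            then (some g, st.2) else st
          | none => st
        else st) st).2
    = match st.2 with
      | none => (match gs with
                 | [] => none
                 | g :: rest => some (pvMinFold (ch.toNat : Int) (rest.map (fun g => ((g.toNat : Int)))) |(ch.toNat : Int) - (g.toNat : Int)|))
      | some m => some (pvMinFold (ch.toNat : Int) (gs.map (fun g => ((g.toNat : Int)))) m) := by
  intro gs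
  induction gs with
  | nil =>
    intro st
    obtain ⟨n1, o2⟩ := st
    cases o2 <;> simp [pvMinFold]
  | cons g gs ih =>
    intro st
    obtain ⟨n1, o2⟩ := st
    cases o2 with
    | none =>
      simp only [List.foldl_cons]
      rw [ih]
    | some m =>
      simp only [List.foldl_cons]
      by_cases h1 : |(ch.toNat : Int) - (g.toNat : Int)| < m
      · simp only [if_pos h1]
        rw [ih]
        simp only [List.map_cons]
        have : pvMinFold (ch.toNat : Int) ((g.toNat : Int) :: gs.map (fun g => ((g.toNat : Int)))) m
            = pvMinFold (ch.toNat : Int) (gs.map (fun g => ((g.toNat : Int)))) (min m |(ch.toNat : Int) - (g.toNat : Int)|) := rfl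
        rw [this, min_eq_right (le_of_lt h1)]
      · by_cases h2 : |(ch.toNat : Int) - (g.toNat : Int)| = m
        · simp only [if_neg h1, if_pos h2]
          have hmin : pvMinFold (ch.toNat : Int) ((g.toNat : Int) :: gs.map (fun g => ((g.toNat : Int)))) m
              = pvMinFold (ch.toNat : Int) (gs.map (fun g => ((g.toNat : Int)))) (min m |(ch.toNat : Int) - (g.toNat : Int)|) := rfl
          cases n1 with
          | none =>
            rw [ih]
            simp only [List.map_cons, hmin, min_eq_left (le_of_eq h2.symm)]
          | some ng =>
            by_cases h3 : |(last.toNat : Int) - (g.toNat : Int)| < |(last.toNat : Int) - (ng.toNat : Int)|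
            · simp only [if_pos h3]
              rw [ih]
              simp only [List.map_cons, hmin, min_eq_left (le_of_eq h2.symm)]
            · simp only [if_neg h3]
              rw [ih]
              simp only [List.map_cons, hmin, min_eq_left (le_of_eq h2.symm)]
        · simp only [if_neg h1, if_neg h2]
          rw [ih]
          simp only [List.map_cons]
          have hmin : pvMinFold (ch.toNat : Int) ((g.toNat : Int) :: gs.map (fun g => ((g.toNat : Int)))) m
              = pvMinFold (ch.toNat : Int) (gs.map (fun g => ((g.toNat : Int)))) (min m |(ch.toNat : Int) - (g.toNat : Int)|) := rfl
          rw [hmin, min_eq_left (by omega)]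


def pvBIG : Int := ((1 <<< 30 : Nat) : Int)
def pvG (good_string : String) : List Int :=
  PySem.Set.ofList (good_string.toList.map (fun g => ((g.toNat : Int))))
def pvUp (G : List Int) (n : Nat) : Option Int := pvScanState G (fun k => (k : Int)) n
def pvDown (G : List Int) (j : Nat) : Option Int := pvScanState G (fun k => 127 - (k : Int)) j
def pvFwdV (G : List Int) (k : Nat) : Int :=
  match pvUp G (k+1) with | some l => (k : Int) - l | none => pvBIG
def pvFwdL (G : List Int) : List Int := (List.range 128).map (fun k => pvFwdV G k)
def pvDist (G : List Int) : List Int :=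
  ((List.range 128).map (fun (j : Nat) =>
    min (PySem.List.pyGetD (pvFwdL G) (127 - (j : Int)) 0)
        (match pvDown G (j+1) with | some l => l - (127 - (j : Int)) | none => pvBIG))).reverse
def pvBwdV (G : List Int) (k : Nat) : Int :=
  match pvDown G (128-k) with | some l => l - (k : Int) | none => pvBIG

-- the table built by B's two sweeps holds the minimum distance to a good code
theorem pvTable (G : List Int) (k : Nat) (hk : k ≤ 127) (m : Int)
    (hb : ∀ g ∈ G, 0 ≤ g ∧ g < 128)
    (hle : ∀ g ∈ G, m ≤ |(k : Int) - g|)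
    (hatt : ∃ g ∈ G, m = |(k : Int) - g|) :
    min (pvFwdV G k) (pvBwdV G k) = m := by
  obtain ⟨gs, hgs, hms⟩ := hatt
  obtain ⟨hgs0, hgs128⟩ := hb gs hgs
  have hBIG : pvBIG = 1073741824 := by decide
  have hmlo : 0 ≤ m := hms ▸ abs_nonneg _
  have hmhi : m ≤ 127 := by
    rw [hms]; rcases abs_cases ((k : Int) - gs) with ⟨h, _⟩ | ⟨h, _⟩ <;> push_cast at * <;> omega
  -- m ≤ pvFwdV
  have h1 : m ≤ pvFwdV G k := by
    cases hup : pvUp G (k+1) with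
    | none => simp only [pvFwdV, hup]; omega
    | some l =>
      obtain ⟨hlG, hl0, hlk, _⟩ := (pvScan_up_char G (k+1)).1 l hup
      have := hle l hlG
      have habs : |(k : Int) - l| = (k : Int) - l := abs_of_nonneg (by push_cast at hlk; omega)
      simp only [pvFwdV, hup]; omega
  -- m ≤ pvBwdV
  have h2 : m ≤ pvBwdV G k := by
    cases hdn : pvDown G (128-k) with
    | none => simp only [pvBwdV, hdn]; omega
    | some l =>
      obtain ⟨hlG, hlge, _, _⟩ := (pvScan_down_char G (128-k)).1 l hdn
      have := hle l hlG
      have hcast : ((128 - k : Nat) : Int) = 128 - (k : Int) := by omega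
      have hkl : (k : Int) ≤ l := by omega
      have habs : |(k : Int) - l| = l - (k : Int) := by
        rcases abs_cases ((k : Int) - l) with ⟨h, _⟩ | ⟨h, _⟩ <;> omega
      simp only [pvBwdV, hdn]; omega
  -- one of the two sides reaches m
  have h3 : pvFwdV G k ≤ m ∨ pvBwdV G k ≤ m := by
    by_cases hcase : gs ≤ (k : Int)
    · left
      cases hup : pvUp G (k+1) with
      | none =>
        exact absurd ⟨hgs0, by push_cast; omega⟩ ((pvScan_up_char G (k+1)).2 hup gs hgs)
      | some l =>
        obtain ⟨_, _, hlk, hmax⟩ := (pvScan_up_char G (k+1)).1 l hup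
        have hgl : gs ≤ l := hmax gs hgs hgs0 (by push_cast; omega)
        have habs : |(k : Int) - gs| = (k : Int) - gs := abs_of_nonneg (by omega)
        simp only [pvFwdV, hup]; omega
    · right
      cases hdn : pvDown G (128-k) with
      | none =>
        have hcast : ((128 - k : Nat) : Int) = 128 - (k : Int) := by omega
        exact absurd ⟨by omega, by omega⟩ ((pvScan_down_char G (128-k)).2 hdn gs hgs)
      | some l =>
        obtain ⟨_, _, _, hmin⟩ := (pvScan_down_char G (128-k)).1 l hdn
        have hcast : ((128 - k : Nat) : Int) = 128 - (k : Int) := by omega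
        have hgl : l ≤ gs := hmin gs hgs (by omega) (by omega)
        have habs : |(k : Int) - gs| = gs - (k : Int) := by
          rcases abs_cases ((k : Int) - gs) with ⟨h, _⟩ | ⟨h, _⟩ <;> omega
        simp only [pvBwdV, hdn]; omega
  rcases h3 with h | h <;> omega

-- the fold's first component alone
theorem pvScan_fold_fst (G : List Int) (out : Option Int → Int → Int) (φ : Nat → Int) (n : Nat) :
    (((List.range n).map φ).foldl (fun (st : List Int × Option Int) c =>
      (st.1 ++ [out (if c ∈ G then some c else st.2) c], if c ∈ G then some c else st.2)) ([], none)).1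
    = (List.range n).map (fun k => out (pvScanState G φ (k+1)) (φ k)) := by
  rw [pvScan_fold]

-- B unfolded: a sum of table lookups
theorem pvB_eq (name good_string : String) :
    calculate_good_name_distance_alt name good_string =
    name.toList.foldl (fun acc ch => acc + PySem.List.pyGetD (pvDist (pvG good_string)) ((ch.toNat : Int)) 0) 0 := by
  unfold calculate_good_name_distance_alt
  rw [show (PySem.Set.ofList (good_string.toList.map (fun g => ((g.toNat : Int))))) = pvG good_string from rfl]
  rw [PySem.List.pyRange_one, PySem.List.pyRange_neg_one]
  rw [show ((128 : Int) - 0).toNat = 128 from rfl, show ((127 : Int) - (-1)).toNat = 128 from rfl]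
  simp only [zero_add]
  rw [pvScan_fold_fst (pvG good_string) (fun s c => match s with | some l => c - l | none => ((1 <<< 30 : Nat) : Int)) (fun k => (k : Int)) 128]
  rw [show ((List.range 128).map (fun k => (fun s c => match s with | some l => c - l | none => ((1 <<< 30 : Nat) : Int)) (pvScanState (pvG good_string) (fun k => (k : Int)) (k+1)) ((k : Int)))) = pvFwdL (pvG good_string) from rfl]
  rw [pvScan_fold_fst (pvG good_string)
      (fun s c => min (PySem.List.pyGetD (pvFwdL (pvG good_string)) c 0) (match s with | some l => l - c | none => ((1 <<< 30 : Nat) : Int)))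
      (fun k => 127 - (k : Int)) 128]
  rfl

-- table lookup at k ≤ 127
theorem pvDist_getD (G : List Int) (k : Nat) (hk : k ≤ 127) :
    (pvDist G).getD k 0 = min (pvFwdV G k) (pvBwdV G k) := by
  unfold pvDist
  rw [List.getD_eq_getElem _ _ (by simpa using by omega)]
  rw [List.getElem_reverse]
  simp only [List.length_map, List.length_range]
  rw [List.getElem_map, List.getElem_range]
  have h1 : (127 : Int) - ((127 - k : Nat) : Int) = (k : Int) := by omega
  have h2 : (128 - 1 - k) = 127 - k := by omega
  rw [h2, h1]
  rw [PySem.List.pyGetD_natCast]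
  unfold pvFwdL
  rw [PySem.List.getD_map_range _ _ _ _ (by omega)]
  have h3 : 127 - k + 1 = 128 - k := by omega
  rw [h3]
  rfl

-- A's per-character contribution (independent of the running last_good_letter)
def pvAVal (gs : List Char) (ch : Char) : Int :=
  if ch ∈ gs then 0
  else match gs with
       | [] => 0
       | g :: rest => pvMinFold (ch.toNat : Int) (rest.map (fun g => ((g.toNat : Int))))
                        |(ch.toNat : Int) - (g.toNat : Int)|

theorem pvA_fold (good_string : String) : ∀ (l : List Char) (t : Int) (lc : Char),
    (l.foldl (fun (st : Int × Char) ch =>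
      if ch ∈ good_string.toList then (st.1, ch)
      else
        let r := pvInnerA ch st.2 good_string.toList
        (st.1 + r.2.getD 0, r.1.getD st.2)) (t, lc)).1
    = t + (l.map (pvAVal good_string.toList)).sum := by
  intro l
  induction l with
  | nil => intro t lc; simp
  | cons ch l ih =>
    intro t lc
    by_cases hm : ch ∈ good_string.toList
    · simp only [List.foldl_cons, if_pos hm, List.map_cons, List.sum_cons]
      rw [ih]
      simp [pvAVal, hm]
    · simp only [List.foldl_cons, if_neg hm, List.map_cons, List.sum_cons]
      rw [ih]
      have hsnd := pvInnerA_snd ch lc good_string.toList (none, none)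
      have : (pvInnerA ch lc good_string.toList).2.getD 0 = pvAVal good_string.toList ch := by
        unfold pvInnerA
        rw [hsnd]
        cases hgs : good_string.toList with
        | nil => simp [pvAVal]
        | cons g rest =>
          rw [hgs] at hm
          simp [pvAVal, hm]
      rw [this]
      ring

-- ===== VERDICT (by name: the statement is the Claim_ definition above) =====
set_option maxRecDepth 8000 in
theorem calculate_good_name_distance_spec : Claim_equal_calculate_good_name_distance := by
  intro name good_string hdom hpre
  unfold Spec_calculate_good_name_distance
  have hgl : good_string.toList ≠ [] := by
    simpa using hpre
  cases hgs : good_string.toList with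
  | nil => exact absurd hgs hgl
  | cons g0 rest =>
  have hget : PySem.Str.pyGet? good_string 0 = some g0 := by
    simp [PySem.Str.pyGet?, PySem.Chars.pyGet?, PySem.List.pyGet?, PySem.List.pyIdx?, hgs]
  simp only [calculate_good_name_distance, hget]
  rw [pvA_fold, pvB_eq, PySem.List.foldl_add]
  simp only [zero_add]
  congr 1
  apply List.map_congr_left
  intro ch hch
  -- domain bounds
  simp only [Dom_calculate_good_name_distance, pvDomStr, Bool.and_eq_true, List.all_eq_true] at hdom
  have hchd : pvDomChar ch = true := hdom.1 ch hch
  have hchk : ch.toNat ≤ 126 := by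
    simp only [pvDomChar, Bool.or_eq_true, Bool.and_eq_true, decide_eq_true_eq, beq_iff_eq] at hchd
    omega
  have hb : ∀ g ∈ pvG good_string, 0 ≤ g ∧ g < 128 := by
    intro g hg
    rw [pvG, PySem.Set.mem_ofList, List.mem_map] at hg
    obtain ⟨c, hc, rfl⟩ := hg
    have := hdom.2 c hc
    simp only [pvDomChar, Bool.or_eq_true, Bool.and_eq_true, decide_eq_true_eq, beq_iff_eq] at this
    omega
  rw [PySem.List.pyGetD_natCast, pvDist_getD _ _ (by omega)]
  by_cases hmem : ch ∈ good_string.toList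
  · rw [pvTable (pvG good_string) ch.toNat (by omega) 0 hb
      (fun g _ => abs_nonneg _)
      ⟨(ch.toNat : Int), by
        rw [pvG, PySem.Set.mem_ofList, List.mem_map]; exact ⟨ch, hmem, rfl⟩, by simp⟩]
    simp [pvAVal, hmem]
  · have hmemG : ∀ g, g ∈ pvG good_string ↔ g ∈ (good_string.toList.map (fun c => ((c.toNat : Int)))) := by
      intro g; rw [pvG, PySem.Set.mem_ofList]
    set c : Int := (ch.toNat : Int) with hc
    set m : Int := pvMinFold c (rest.map (fun g => ((g.toNat : Int)))) |c - (g0.toNat : Int)| with hmdef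
    have hle : ∀ g ∈ pvG good_string, m ≤ |c - g| := by
      intro g hg
      rw [hmemG, hgs, List.map_cons, List.mem_cons] at hg
      rcases hg with rfl | hg
      · exact le_trans (pvMinFold_le_init _ _ _) (le_refl _)
      · exact pvMinFold_le_mem _ _ _ hg
    have hatt : ∃ g ∈ pvG good_string, m = |c - g| := by
      rcases pvMinFold_attained c (rest.map (fun g => ((g.toNat : Int)))) |c - (g0.toNat : Int)| with h | ⟨g, hg, h⟩
      · exact ⟨(g0.toNat : Int), by rw [hmemG, hgs, List.map_cons]; exact List.mem_cons_self, h⟩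
      · exact ⟨g, by rw [hmemG, hgs, List.map_cons]; exact List.mem_cons_of_mem _ hg, h⟩
    rw [pvTable (pvG good_string) ch.toNat (by omega) m hb hle hatt]
    rw [hgs] at hmem
    simp only [List.mem_cons] at hmem
    simp only [pvAVal, hgs, List.mem_cons, if_neg hmem]
    exact hmdef.symm
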